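-- pv_equiv track=rewrite | github.com/neev13/CSE508_Winter2024_A1_2020390 | q2.py | or_query_helper
-- ===== SOURCE A (Python) =====
-- def or_query_helper(posting_list1, size1, posting_list2, size2):
--     result = []
--     count = 0
--     i = 0
--     j = 0
--
--     while i < size1 and j < size2:
--         count += 1
--         if posting_list1[i] == posting_list2[j]:
--             result.append(posting_list1[i])
--             i += 1
--             j += 1
--         elif posting_list1[i] < posting_list2[j]:
--             result.append(posting_list1[i])
--             i += 1
--         else:
--             result.append(posting_list2[j])
--             j += 1
--
--     while i < size1:
--         count += 1
--         result.append(posting_list1[i])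
--         i += 1
--
--     while j < size2:
--         count += 1
--         result.append(posting_list2[j])
--         j += 1
--
--     return result, count
-- ===== SOURCE B (Python) =====
-- def or_query_helper(posting_list1, size1, posting_list2, size2):
--     xs = posting_list1[:max(size1, 0)][::-1]
--     ys = posting_list2[:max(size2, 0)][::-1]
--     out = []
--     while xs and ys:
--         if xs[-1] == ys[-1]:
--             out.append(xs.pop())
--             ys.pop()
--         elif xs[-1] < ys[-1]:
--             out.append(xs.pop())
--         else:
--             out.append(ys.pop())
--     out.extend(reversed(xs))
--     out.extend(reversed(ys))
--     return out, len(out)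
-- ===== Notes on version B (the rewrite author's own statement) =====
-- stated objective: alternative
-- what changed: B first materialises the two clamped prefixes as reversed stacks, merges by popping stack tops (no index pointers, no count accumulator), then flushes both remainders with extend(reversed(...)) and returns len(result) as the op count, relying on the invariant that A increments count exactly once per append.
import Mathlib
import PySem

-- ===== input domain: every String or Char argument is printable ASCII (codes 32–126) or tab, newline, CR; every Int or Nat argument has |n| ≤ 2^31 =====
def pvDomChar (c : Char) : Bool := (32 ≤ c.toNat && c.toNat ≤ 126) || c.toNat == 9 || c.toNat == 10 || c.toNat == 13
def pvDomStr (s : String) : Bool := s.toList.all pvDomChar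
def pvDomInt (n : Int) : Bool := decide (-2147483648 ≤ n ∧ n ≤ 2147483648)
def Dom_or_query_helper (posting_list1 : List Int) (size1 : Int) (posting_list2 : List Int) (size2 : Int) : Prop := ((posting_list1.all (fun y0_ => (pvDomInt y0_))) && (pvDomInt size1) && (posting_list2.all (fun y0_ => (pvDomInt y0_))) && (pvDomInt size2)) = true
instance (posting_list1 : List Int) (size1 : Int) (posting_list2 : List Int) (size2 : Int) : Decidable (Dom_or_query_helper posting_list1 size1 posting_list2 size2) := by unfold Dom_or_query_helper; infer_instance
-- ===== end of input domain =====

-- B merges reversed stack copies of the clamped prefixes by popping stack tops (no index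
-- pointers, no count accumulator, remainders flushed in one go), returning len(result) as the count.
-- (Fuel arguments are totality guards only; each loop is entered with fuel ≥ its trip count.)

-- ===== PORT A =====
-- the two drain loops 'while i < size: count += 1; result.append(pl[i]); i += 1'
def pvDrainA (pl : List Int) (size : Int) : Nat → Int → List Int → Int → List Int × Int
  | 0, _, result, count => (result, count)
  | fuel + 1, i, result, count =>
    if i < size then
      pvDrainA pl size fuel (i + 1) (result ++ [PySem.List.pyGetD pl i 0]) (count + 1)
    else (result, count)

-- the two drains in sequence, as they follow the first loop
def pvTailA (pl1 : List Int) (size1 : Int) (pl2 : List Int) (size2 : Int)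
    (i j : Int) (result : List Int) (count : Int) : List Int × Int :=
  pvDrainA pl2 size2 (size2 - j).toNat j
    (pvDrainA pl1 size1 (size1 - i).toNat i result count).1
    (pvDrainA pl1 size1 (size1 - i).toNat i result count).2

-- the first loop 'while i < size1 and j < size2'
def pvMergeA (pl1 : List Int) (size1 : Int) (pl2 : List Int) (size2 : Int) :
    Nat → Int → Int → List Int → Int → List Int × Int
  | 0, i, j, result, count => pvTailA pl1 size1 pl2 size2 i j result count
  | fuel + 1, i, j, result, count =>
    if i < size1 ∧ j < size2 then
      let a := PySem.List.pyGetD pl1 i 0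
      let b := PySem.List.pyGetD pl2 j 0
      if a = b then
        pvMergeA pl1 size1 pl2 size2 fuel (i + 1) (j + 1) (result ++ [a]) (count + 1)
      else if a < b then
        pvMergeA pl1 size1 pl2 size2 fuel (i + 1) j (result ++ [a]) (count + 1)
      else
        pvMergeA pl1 size1 pl2 size2 fuel i (j + 1) (result ++ [b]) (count + 1)
    else pvTailA pl1 size1 pl2 size2 i j result count

def or_query_helper (posting_list1 : List Int) (size1 : Int) (posting_list2 : List Int) (size2 : Int) : List Int × Int :=
  pvMergeA posting_list1 size1 posting_list2 size2 (size1.toNat + size2.toNat) 0 0 [] 0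

-- ===== PORT B =====
-- 'while xs and ys: compare xs[-1], ys[-1]; pop the chosen top(s) onto out'
-- returns the final (xs, ys, out)
def pvStackLoopB : Nat → List Int → List Int → List Int → List Int × List Int × List Int
  | 0, xs, ys, out => (xs, ys, out)
  | fuel + 1, xs, ys, out =>
    if xs ≠ [] ∧ ys ≠ [] then
      if PySem.List.pyGetD xs (-1) 0 = PySem.List.pyGetD ys (-1) 0 then
        pvStackLoopB fuel xs.dropLast ys.dropLast (out ++ [PySem.List.pyGetD xs (-1) 0])
      else if PySem.List.pyGetD xs (-1) 0 < PySem.List.pyGetD ys (-1) 0 then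
        pvStackLoopB fuel xs.dropLast ys (out ++ [PySem.List.pyGetD xs (-1) 0])
      else
        pvStackLoopB fuel xs ys.dropLast (out ++ [PySem.List.pyGetD ys (-1) 0])
    else (xs, ys, out)

def or_query_helper_alt (posting_list1 : List Int) (size1 : Int) (posting_list2 : List Int) (size2 : Int) : List Int × Int :=
  -- xs = posting_list1[:max(size1, 0)][::-1], ys likewise
  let xs := (PySem.List.slice posting_list1 none (some (max size1 0))).reverse
  let ys := (PySem.List.slice posting_list2 none (some (max size2 0))).reverse
  let t := pvStackLoopB (xs.length + ys.length) xs ys []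
  -- out.extend(reversed(xs)); out.extend(reversed(ys))
  let res := t.2.2 ++ t.1.reverse ++ t.2.1.reverse
  (res, (res.length : Int))

-- ===== PRECONDITION & SPEC =====
-- A raises IndexError exactly when size1 > len(posting_list1) or size2 > len(posting_list2)
def Pre_or_query_helper (posting_list1 : List Int) (size1 : Int) (posting_list2 : List Int) (size2 : Int) : Prop :=
  size1 ≤ (posting_list1.length : Int) ∧ size2 ≤ (posting_list2.length : Int)
instance (posting_list1 : List Int) (size1 : Int) (posting_list2 : List Int) (size2 : Int) : Decidable (Pre_or_query_helper posting_list1 size1 posting_list2 size2) := by unfold Pre_or_query_helper; infer_instance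

def pvWitness_or_query_helper : List Int × Int × List Int × Int := ([1, 3, 5], 3, [2, 3, 6, 8], 4)

def Spec_or_query_helper (posting_list1 : List Int) (size1 : Int) (posting_list2 : List Int) (size2 : Int) (out : List Int × Int) : Prop := out = or_query_helper_alt posting_list1 size1 posting_list2 size2
instance (posting_list1 : List Int) (size1 : Int) (posting_list2 : List Int) (size2 : Int) (out : List Int × Int) : Decidable (Spec_or_query_helper posting_list1 size1 posting_list2 size2 out) := by unfold Spec_or_query_helper; infer_instance

-- ===== CLAIM (what is proved, stated in full; the proofs are below) =====
def Claim_equal_or_query_helper : Prop := ∀ (posting_list1 : List Int) (size1 : Int) (posting_list2 : List Int) (size2 : Int), Dom_or_query_helper posting_list1 size1 posting_list2 size2 → Pre_or_query_helper posting_list1 size1 posting_list2 size2 → Spec_or_query_helper posting_list1 size1 posting_list2 size2 (or_query_helper posting_list1 size1 posting_list2 size2)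

-- ===== LEMMAS AND PROOFS =====

-- the common merge both programs compute, as structural recursion on the two remainders
def hMerge : List Int → List Int → List Int
  | [], ys => ys
  | x :: xs, [] => x :: xs
  | a :: xs, b :: ys =>
    if a = b then a :: hMerge xs ys
    else if a < b then a :: hMerge xs (b :: ys)
    else b :: hMerge (a :: xs) ys

theorem hMerge_nil_right (xs : List Int) : hMerge xs [] = xs := by
  cases xs <;> simp [hMerge]

-- ---- B side: the stack loop computes hMerge of the un-reversed stacks ----
theorem pvStackLoopB_eq (f : Nat) (u v out : List Int) (hf : u.length + v.length ≤ f) :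
    (fun t => t.2.2 ++ t.1.reverse ++ t.2.1.reverse : List Int × List Int × List Int → List Int)
      (pvStackLoopB f u.reverse v.reverse out) = out ++ hMerge u v := by
  induction f generalizing u v out with
  | zero =>
    have hu : u = [] := by
      cases u with | nil => rfl | cons a t => simp at hf
    have hv : v = [] := by
      cases v with | nil => rfl | cons a t => simp at hf
    subst hu; subst hv; simp [pvStackLoopB, hMerge]
  | succ f ih =>
    cases u with
    | nil =>
      simp [pvStackLoopB, hMerge]
    | cons a u' =>
      cases v with
      | nil =>
        simp [pvStackLoopB, hMerge_nil_right]
      | cons b v' =>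
        have hcond : (a :: u').reverse ≠ [] ∧ (b :: v').reverse ≠ [] := by simp
        have hga : PySem.List.pyGetD (a :: u').reverse (-1) 0 = a := by
          rw [List.reverse_cons]; exact PySem.List.pyGetD_neg_one_append_singleton _ _ _
        have hgb : PySem.List.pyGetD (b :: v').reverse (-1) 0 = b := by
          rw [List.reverse_cons]; exact PySem.List.pyGetD_neg_one_append_singleton _ _ _
        have hda : (a :: u').reverse.dropLast = u'.reverse := by
          rw [List.reverse_cons]; exact List.dropLast_concat
        have hdb : (b :: v').reverse.dropLast = v'.reverse := by
          rw [List.reverse_cons]; exact List.dropLast_concat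
        rw [pvStackLoopB, if_pos hcond, hga, hgb, hda, hdb]
        by_cases heq : a = b
        · rw [if_pos heq, ih u' v' (out ++ [a]) (by simp at hf ⊢; omega)]
          simp [hMerge, heq]
        · rw [if_neg heq]
          by_cases hlt : a < b
          · rw [if_pos hlt, ih u' (b :: v') (out ++ [a]) (by simp at hf ⊢; omega)]
            simp [hMerge, heq, hlt]
          · rw [if_neg hlt, ih (a :: u') v' (out ++ [b]) (by simp at hf ⊢; omega)]
            simp [hMerge, heq, hlt]

-- ---- A side: the remaining slice of list pl between index i and size ----
def pvRem (pl : List Int) (size i : Int) : List Int :=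
  (pl.take size.toNat).drop i.toNat

theorem pvRem_nil (pl : List Int) (size i : Int) (h : size ≤ i) : pvRem pl size i = [] := by
  apply List.eq_nil_of_length_eq_zero
  simp [pvRem, List.length_take, List.length_drop]
  omega

theorem pvRem_head (pl : List Int) (size i : Int) (h0 : 0 ≤ i) (hi : i < size)
    (hs : size ≤ (pl.length : Int)) :
    pvRem pl size i = PySem.List.pyGetD pl i 0 :: pvRem pl size (i + 1) := by
  have hilen : i < (pl.length : Int) := lt_of_lt_of_le hi hs
  have hne : pvRem pl size i ≠ [] := by
    intro h
    have := congrArg List.length h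
    simp [pvRem, List.length_take, List.length_drop] at this
    omega
  have hhead : (pvRem pl size i).head? = some (PySem.List.pyGetD pl i 0) := by
    unfold pvRem
    rw [List.head?_drop]
    rw [List.getElem?_take_of_lt (by omega)]
    rw [PySem.List.pyGetD_eq_getElem pl 0 h0 hilen]
    exact List.getElem?_eq_getElem (by omega)
  have htail : pvRem pl size (i + 1) = (pvRem pl size i).tail := by
    unfold pvRem
    have h1 : (i + 1).toNat = i.toNat + 1 := by omega
    rw [h1, ← List.tail_drop]
  cases hcase : pvRem pl size i with
  | nil => exact absurd hcase hne
  | cons x t =>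
    rw [hcase] at hhead htail
    simp at hhead
    simp [hhead, htail]

theorem pvDrainA_eq (pl : List Int) (size : Int) (f : Nat) (i : Int) (result : List Int)
    (count : Int) (h0 : 0 ≤ i) (hs : size ≤ (pl.length : Int))
    (hf : (size - i).toNat ≤ f) :
    pvDrainA pl size f i result count =
      (result ++ pvRem pl size i, count + ((pvRem pl size i).length : Int)) := by
  induction f generalizing i result count with
  | zero =>
    rw [pvRem_nil pl size i (by omega)]
    simp [pvDrainA]
  | succ f ih =>
    by_cases hi : i < size
    · rw [pvRem_head pl size i h0 hi hs]
      rw [pvDrainA, if_pos hi, ih (i + 1) _ _ (by omega) (by omega)]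
      simp
      omega
    · rw [pvRem_nil pl size i (by omega)]
      simp [pvDrainA, hi]

theorem pvTailA_eq (pl1 : List Int) (size1 : Int) (pl2 : List Int) (size2 : Int)
    (i j : Int) (result : List Int) (count : Int)
    (h0i : 0 ≤ i) (h0j : 0 ≤ j)
    (hs1 : size1 ≤ (pl1.length : Int)) (hs2 : size2 ≤ (pl2.length : Int))
    (h : ¬ (i < size1 ∧ j < size2)) :
    pvTailA pl1 size1 pl2 size2 i j result count =
      (result ++ hMerge (pvRem pl1 size1 i) (pvRem pl2 size2 j),
       count + ((hMerge (pvRem pl1 size1 i) (pvRem pl2 size2 j)).length : Int)) := by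
  unfold pvTailA
  rw [pvDrainA_eq pl1 size1 _ i result count h0i hs1 le_rfl]
  rw [pvDrainA_eq pl2 size2 _ j _ _ h0j hs2 le_rfl]
  rcases (by omega : size1 ≤ i ∨ size2 ≤ j) with hle | hle
  · rw [pvRem_nil pl1 size1 i hle]
    simp [hMerge]
  · rw [pvRem_nil pl2 size2 j hle]
    simp [hMerge_nil_right]

theorem pvMergeA_eq (pl1 : List Int) (size1 : Int) (pl2 : List Int) (size2 : Int)
    (f : Nat) (i j : Int) (result : List Int) (count : Int)
    (h0i : 0 ≤ i) (h0j : 0 ≤ j)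
    (hs1 : size1 ≤ (pl1.length : Int)) (hs2 : size2 ≤ (pl2.length : Int))
    (hf : (size1 - i).toNat + (size2 - j).toNat ≤ f) :
    pvMergeA pl1 size1 pl2 size2 f i j result count =
      (result ++ hMerge (pvRem pl1 size1 i) (pvRem pl2 size2 j),
       count + ((hMerge (pvRem pl1 size1 i) (pvRem pl2 size2 j)).length : Int)) := by
  induction f generalizing i j result count with
  | zero =>
    exact pvTailA_eq pl1 size1 pl2 size2 i j result count h0i h0j hs1 hs2 (by omega)
  | succ f ih =>
    by_cases h : i < size1 ∧ j < size2
    · have hr1 := pvRem_head pl1 size1 i h0i h.1 hs1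
      have hr2 := pvRem_head pl2 size2 j h0j h.2 hs2
      simp only [pvMergeA, if_pos h]
      by_cases heq : PySem.List.pyGetD pl1 i 0 = PySem.List.pyGetD pl2 j 0
      · rw [if_pos heq, ih (i + 1) (j + 1) _ _ (by omega) (by omega) (by omega)]
        have hm : hMerge (pvRem pl1 size1 i) (pvRem pl2 size2 j) =
            PySem.List.pyGetD pl1 i 0 :: hMerge (pvRem pl1 size1 (i + 1)) (pvRem pl2 size2 (j + 1)) := by
          rw [hr1, hr2]; simp [hMerge, heq]
        rw [hm]
        simp
        omega
      · rw [if_neg heq]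
        by_cases hlt : PySem.List.pyGetD pl1 i 0 < PySem.List.pyGetD pl2 j 0
        · rw [if_pos hlt, ih (i + 1) j _ _ (by omega) (by omega) (by omega)]
          have hm : hMerge (pvRem pl1 size1 i) (pvRem pl2 size2 j) =
              PySem.List.pyGetD pl1 i 0 :: hMerge (pvRem pl1 size1 (i + 1)) (pvRem pl2 size2 j) := by
            have hstep : hMerge (PySem.List.pyGetD pl1 i 0 :: pvRem pl1 size1 (i + 1))
                (PySem.List.pyGetD pl2 j 0 :: pvRem pl2 size2 (j + 1)) =
                PySem.List.pyGetD pl1 i 0 :: hMerge (pvRem pl1 size1 (i + 1))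
                  (PySem.List.pyGetD pl2 j 0 :: pvRem pl2 size2 (j + 1)) := by
              simp [hMerge, heq, hlt]
            rw [hr1, hr2, hstep, ← hr2]
          rw [hm]
          simp
          omega
        · rw [if_neg hlt, ih i (j + 1) _ _ (by omega) (by omega) (by omega)]
          have hm : hMerge (pvRem pl1 size1 i) (pvRem pl2 size2 j) =
              PySem.List.pyGetD pl2 j 0 :: hMerge (pvRem pl1 size1 i) (pvRem pl2 size2 (j + 1)) := by
            have hstep : hMerge (PySem.List.pyGetD pl1 i 0 :: pvRem pl1 size1 (i + 1))
                (PySem.List.pyGetD pl2 j 0 :: pvRem pl2 size2 (j + 1)) =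
                PySem.List.pyGetD pl2 j 0 :: hMerge (PySem.List.pyGetD pl1 i 0 :: pvRem pl1 size1 (i + 1))
                  (pvRem pl2 size2 (j + 1)) := by
              simp [hMerge, heq, hlt]
            rw [hr1, hr2, hstep, ← hr1]
          rw [hm]
          simp
          omega
    · simp only [pvMergeA, if_neg h]
      exact pvTailA_eq pl1 size1 pl2 size2 i j result count h0i h0j hs1 hs2 h

-- ===== VERDICT (by name: the statement is the Claim_ definition above) =====
theorem or_query_helper_spec : Claim_equal_or_query_helper := by
  intro pl1 s1 pl2 s2 _ hpre
  obtain ⟨h1, h2⟩ := hpre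
  unfold Spec_or_query_helper or_query_helper or_query_helper_alt
  rw [pvMergeA_eq pl1 s1 pl2 s2 (s1.toNat + s2.toNat) 0 0 [] 0 le_rfl le_rfl h1 h2 (by omega)]
  have hm1 : max s1 0 = ((s1.toNat : Nat) : Int) := by omega
  have hm2 : max s2 0 = ((s2.toNat : Nat) : Int) := by omega
  rw [hm1, hm2, PySem.List.slice_to_natCast, PySem.List.slice_to_natCast]
  have hloop := pvStackLoopB_eq ((pl1.take s1.toNat).reverse.length + (pl2.take s2.toNat).reverse.length)
      (pl1.take s1.toNat) (pl2.take s2.toNat) [] (by simp)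
  simp only [] at hloop ⊢
  rw [hloop]
  simp [pvRem]
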